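-- pv_equiv track=rewrite | github.com/kmesiab/concept-model-protein-classifier | data_download.py | _parse_fasta_block
-- ===== SOURCE A (Python) =====
-- from typing import List, Optional, Tuple
--
-- def _parse_fasta_block(block: str) -> List[str]:
--     """
--     Parse a FASTA format block and extract sequences.
--     Returns a list of sequence strings (without headers).
--     """
--     raw_lines = block.splitlines()
--     header = None
--     seq_buf = ""
--     sequences = []
--
--     for line in raw_lines:
--         if line.startswith(">"):
--             if header is not None and seq_buf:
--                 sequences.append(seq_buf)
--             header = line
--             seq_buf = ""
--         else:
--             seq_buf += line.strip()
--
--     if header is not None and seq_buf: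
--         sequences.append(seq_buf)
--
--     return sequences
-- ===== SOURCE B (Python) =====
-- from itertools import groupby
-- from typing import List
--
-- def _parse_fasta_block(block: str) -> List[str]:
--     """Group consecutive lines by whether they are headers, then emit one
--     joined-stripped sequence per sequence-group that follows a header."""
--     sequences = []
--     seen_header = False
--     for is_header, group in groupby(block.splitlines(), key=lambda line: line.startswith(">")):
--         if is_header:
--             seen_header = True
--         elif seen_header:
--             seq = "".join(line.strip() for line in group)
--             if seq:
--                 sequences.append(seq)
--     return sequences
-- ===== Notes on version B (the rewrite author's own statement) =====
-- stated objective: alternative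
-- what changed: Replaces A's stateful flush-on-boundary scan (header flag plus a growing string buffer) by grouping consecutive lines with itertools.groupby on whether the line is a header, then emitting one joined-stripped sequence per sequence-group that follows a header.
import Mathlib
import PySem

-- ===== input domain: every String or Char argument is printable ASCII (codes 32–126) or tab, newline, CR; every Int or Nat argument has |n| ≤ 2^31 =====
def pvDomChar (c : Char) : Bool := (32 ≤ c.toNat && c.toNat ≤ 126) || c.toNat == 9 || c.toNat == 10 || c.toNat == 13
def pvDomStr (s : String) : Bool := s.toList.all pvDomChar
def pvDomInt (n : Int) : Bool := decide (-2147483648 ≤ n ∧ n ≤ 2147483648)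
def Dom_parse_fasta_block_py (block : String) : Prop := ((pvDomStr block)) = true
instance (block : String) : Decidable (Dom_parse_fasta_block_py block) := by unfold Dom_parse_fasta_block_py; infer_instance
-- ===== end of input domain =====

-- B groups consecutive lines by header-ness (itertools.groupby) and walks the groups, instead of A's stateful flush-on-boundary buffer scan (objective: alternative decomposition).

-- ===== PORT A =====
-- A's loop state (header, seq_buf, sequences); strings handled as List Char per the PySem convention.
def pvStepA (st : Option (List Char) × List Char × List (List Char)) (line : List Char) :
    Option (List Char) × List Char × List (List Char) :=
  let (header, seq_buf, sequences) := st
  if PySem.Chars.startswith line ['>'] then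
    (some line, [],
      if header.isSome && !(seq_buf.isEmpty) then sequences ++ [seq_buf] else sequences)
  else
    (header, seq_buf ++ PySem.Chars.strip line, sequences)

def parse_fasta_block_py (block : String) : List String :=
  let raw_lines := (PySem.Str.splitlines block).map String.toList
  let st := raw_lines.foldl pvStepA (none, [], [])
  let sequences :=
    if st.1.isSome && !(st.2.1.isEmpty) then st.2.2 ++ [st.2.1] else st.2.2
  sequences.map String.ofList

-- ===== PORT B =====
-- itertools.groupby(lines, key = startswith '>'): consecutive runs with their key.
def pvGroupBy (lines : List (List Char)) : List (Bool × List (List Char)) :=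
  match lines with
  | [] => []
  | l :: ls =>
    let k := PySem.Chars.startswith l ['>']
    (k, l :: ls.takeWhile (fun x => PySem.Chars.startswith x ['>'] == k)) ::
      pvGroupBy (ls.dropWhile (fun x => PySem.Chars.startswith x ['>'] == k))
termination_by lines.length
decreasing_by
  simp only [List.length_cons]
  exact Nat.lt_succ_of_le (ls.length_dropWhile_le _)

-- the walk over the groups, maintaining B's seen_header flag
def pvWalk (seen : Bool) (groups : List (Bool × List (List Char))) : List (List Char) :=
  match groups with
  | [] => []
  | (true, _) :: gs => pvWalk true gs
  | (false, grp) :: gs =>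
    let seq := (grp.map PySem.Chars.strip).flatten   -- "".join(line.strip() for line in group)
    (if seen && seq ≠ [] then [seq] else []) ++ pvWalk seen gs

def parse_fasta_block_py_alt (block : String) : List String :=
  (pvWalk false (pvGroupBy ((PySem.Str.splitlines block).map String.toList))).map String.ofList

-- ===== PRECONDITION & SPEC =====
def Spec_parse_fasta_block_py (block : String) (out : List String) : Prop := out = parse_fasta_block_py_alt block
instance (block : String) (out : List String) : Decidable (Spec_parse_fasta_block_py block out) := by unfold Spec_parse_fasta_block_py; infer_instance

-- ===== CLAIM (what is proved, stated in full; the proofs are below) =====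
def Claim_equal_parse_fasta_block_py : Prop := ∀ (block : String), Dom_parse_fasta_block_py block → Spec_parse_fasta_block_py block (parse_fasta_block_py block)

-- ===== LEMMAS AND PROOFS =====

-- reference recursion: A's state machine with the sequences accumulator factored out
def pvRef (seen : Bool) (buf : List Char) (lines : List (List Char)) : List (List Char) :=
  match lines with
  | [] => if seen && buf ≠ [] then [buf] else []
  | l :: ls =>
    if PySem.Chars.startswith l ['>'] then
      (if seen && buf ≠ [] then [buf] else []) ++ pvRef true [] ls
    else
      pvRef seen (buf ++ PySem.Chars.strip l) ls

def pvFinish (st : Option (List Char) × List Char × List (List Char)) : List (List Char) :=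
  if st.1.isSome && !(st.2.1.isEmpty) then st.2.2 ++ [st.2.1] else st.2.2

theorem pvA_eq_ref (lines : List (List Char)) :
    ∀ (h : Option (List Char)) (buf : List Char) (seqs : List (List Char)),
      pvFinish (lines.foldl pvStepA (h, buf, seqs)) = seqs ++ pvRef h.isSome buf lines := by
  induction lines with
  | nil =>
    intro h buf seqs
    cases h <;> by_cases hb : buf = [] <;> simp [pvFinish, pvRef, hb]
  | cons l ls ih =>
    intro h buf seqs
    simp only [List.foldl_cons, pvStepA, pvRef]
    by_cases hs : PySem.Chars.startswith l ['>'] = true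
    · simp only [hs, if_pos, ih]
      cases h <;> by_cases hb : buf = [] <;>
        simp [hb, List.append_assoc]
    · simp [hs, ih]

theorem pvRef_append_nonheaders (grp : List (List Char))
    (hgrp : ∀ x ∈ grp, PySem.Chars.startswith x ['>'] = false) :
    ∀ (seen : Bool) (buf : List Char) (rest : List (List Char)),
      pvRef seen buf (grp ++ rest) = pvRef seen (buf ++ (grp.map PySem.Chars.strip).flatten) rest := by
  induction grp with
  | nil => intro seen buf rest; simp
  | cons l ls ih =>
    intro seen buf rest
    have hl := hgrp l (by simp)
    have ih' := ih (fun x hx => hgrp x (by simp [hx]))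
    simp [pvRef, hl, ih', List.append_assoc]

theorem pvRef_append_headers (grp : List (List Char))
    (hgrp : ∀ x ∈ grp, PySem.Chars.startswith x ['>'] = true) :
    ∀ (rest : List (List Char)), pvRef true [] (grp ++ rest) = pvRef true [] rest := by
  induction grp with
  | nil => intro rest; simp
  | cons l ls ih =>
    intro rest
    have hl := hgrp l (by simp)
    have ih' := ih (fun x hx => hgrp x (by simp [hx]))
    simp [pvRef, hl, ih']

theorem pvWalk_eq_ref (n : ℕ) :
    ∀ (lines : List (List Char)), lines.length ≤ n →
      ∀ (seen : Bool), pvWalk seen (pvGroupBy lines) = pvRef seen [] lines := by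
  induction n with
  | zero =>
    intro lines hlen seen
    have : lines = [] := List.eq_nil_of_length_eq_zero (Nat.le_zero.mp hlen)
    subst this; simp [pvGroupBy, pvWalk, pvRef]
  | succ n ih =>
    intro lines hlen seen
    match lines with
    | [] => simp [pvGroupBy, pvWalk, pvRef]
    | l :: ls =>
      simp only [pvGroupBy]
      by_cases hs : PySem.Chars.startswith l ['>'] = true
      · -- header group
        simp only [hs]
        rw [show pvWalk seen ((true, l :: ls.takeWhile (fun x => PySem.Chars.startswith x ['>'] == true)) ::
              pvGroupBy (ls.dropWhile (fun x => PySem.Chars.startswith x ['>'] == true)))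
            = pvWalk true (pvGroupBy (ls.dropWhile (fun x => PySem.Chars.startswith x ['>'] == true))) from rfl]
        have hlen' : (ls.dropWhile (fun x => PySem.Chars.startswith x ['>'] == true)).length ≤ n := by
          have := ls.length_dropWhile_le (fun x => PySem.Chars.startswith x ['>'] == true)
          simp only [List.length_cons] at hlen; omega
        rw [ih _ hlen' true]
        have hsplit : ls = ls.takeWhile (fun x => PySem.Chars.startswith x ['>'] == true) ++
            ls.dropWhile (fun x => PySem.Chars.startswith x ['>'] == true) :=
          (ls.takeWhile_append_dropWhile).symm
        conv_rhs => rw [pvRef, if_pos hs, hsplit]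
        rw [pvRef_append_headers _ (fun x hx => by
          have := List.mem_takeWhile_imp hx; simpa using this)]
        simp
      · -- sequence group
        simp only [hs]
        have hsfalse : PySem.Chars.startswith l ['>'] = false := by simpa using hs
        have hsplit : ls = ls.takeWhile (fun x => PySem.Chars.startswith x ['>'] == false) ++
            ls.dropWhile (fun x => PySem.Chars.startswith x ['>'] == false) :=
          (ls.takeWhile_append_dropWhile).symm
        have hlen' : (ls.dropWhile (fun x => PySem.Chars.startswith x ['>'] == false)).length ≤ n := by
          have := ls.length_dropWhile_le (fun x => PySem.Chars.startswith x ['>'] == false)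
          simp only [List.length_cons] at hlen; omega
        have hgrp : ∀ x ∈ l :: ls.takeWhile (fun x => PySem.Chars.startswith x ['>'] == false),
            PySem.Chars.startswith x ['>'] = false := by
          intro x hx
          rcases List.mem_cons.mp hx with h | h
          · subst h; exact hsfalse
          · have := List.mem_takeWhile_imp h; simpa using this
        conv_rhs => rw [show l :: ls = (l :: ls.takeWhile (fun x => PySem.Chars.startswith x ['>'] == false)) ++
              ls.dropWhile (fun x => PySem.Chars.startswith x ['>'] == false) from by
            simp only [List.cons_append]; rw [← hsplit]]
        rw [pvRef_append_nonheaders _ hgrp]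
        simp only [List.nil_append, pvWalk]
        rcases hrest : ls.dropWhile (fun x => PySem.Chars.startswith x ['>'] == false) with _ | ⟨r, rest'⟩
        · simp [pvGroupBy, pvWalk, pvRef]
        · have hr : PySem.Chars.startswith r ['>'] = true := by
            have hhead := List.head?_dropWhile_not (fun x => PySem.Chars.startswith x ['>'] == false) ls
            rw [hrest] at hhead
            simpa using hhead
          rw [hrest] at hlen'
          rw [ih (r :: rest') hlen' seen]
          simp [pvRef, hr]

-- ===== VERDICT (by name: the statement is the Claim_ definition above) =====
theorem parse_fasta_block_py_spec : Claim_equal_parse_fasta_block_py := by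
  intro block _
  show _ = _
  simp only [parse_fasta_block_py, parse_fasta_block_py_alt]
  have hA := pvA_eq_ref ((PySem.Str.splitlines block).map String.toList) none [] []
  have hB := pvWalk_eq_ref ((PySem.Str.splitlines block).map String.toList).length
      ((PySem.Str.splitlines block).map String.toList) le_rfl false
  simp only [pvFinish, Option.isSome_none, List.nil_append] at hA
  rw [hA, hB]
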